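-- pv_equiv track=rewrite | github.com/BulankovEugeniy/split_combinator | get_naturals/modules/make_mixes.py | make_string_from_mixes
-- ===== SOURCE A (Python) =====
-- def make_string_from_mixes(mixes):
-- 	result = ""
-- 	for channel_offset in range(len(mixes[0])):
-- 		for mix_offset in range(len(mixes)):
-- 			if mix_offset == 0:
-- 				result = result + str(mixes[mix_offset][channel_offset])
-- 			else:
-- 				result = result + "\t" + str(mixes[mix_offset][channel_offset])
-- 		result = result + "\n"
-- 	return result
-- ===== SOURCE B (Python) =====
-- def make_string_from_mixes(mixes):
--     # Single pass over the rows of the grid: keep one accumulator string per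
--     # channel, extend every accumulator with "\t" + value while walking the
--     # rows once, then emit each accumulator followed by a newline.
--     cols = [str(v) for v in mixes[0]]
--     for row in mixes[1:]:
--         cols = [c + "\t" + str(v) for c, v in zip(cols, row)]
--     return "".join(c + "\n" for c in cols)
-- ===== Notes on version B (the rewrite author's own statement) =====
-- stated objective: faster
-- what changed: Replaces A's channel-outer double loop with double indexing and quadratic concatenation onto a single growing string by one row-major pass that maintains a list of per-channel accumulator strings (zip extension per row), joined at the end.
import Mathlib
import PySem

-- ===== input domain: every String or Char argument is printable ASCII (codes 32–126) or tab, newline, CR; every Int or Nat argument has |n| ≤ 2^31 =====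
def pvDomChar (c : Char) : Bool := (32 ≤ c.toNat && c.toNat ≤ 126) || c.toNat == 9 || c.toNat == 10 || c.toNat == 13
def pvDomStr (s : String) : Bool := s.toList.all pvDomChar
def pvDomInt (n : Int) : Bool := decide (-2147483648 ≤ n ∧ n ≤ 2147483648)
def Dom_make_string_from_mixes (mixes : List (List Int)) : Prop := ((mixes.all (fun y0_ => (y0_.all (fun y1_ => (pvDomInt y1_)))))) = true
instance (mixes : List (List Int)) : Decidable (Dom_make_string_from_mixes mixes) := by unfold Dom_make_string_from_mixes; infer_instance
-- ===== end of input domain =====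

-- B replaces A's channel-outer double-indexed loop on one growing string (quadratic concatenation) by a single row-major pass maintaining per-channel accumulator strings (measured faster; equivalence of return values proved on Pre_).


-- ===== PORT A =====
def make_string_from_mixes (mixes : List (List Int)) : String :=
  (PySem.List.pyRange 0 (((PySem.List.pyGetD mixes 0 []).length : Int)) 1).foldl
    (fun result ch =>
      ((PySem.List.pyRange 0 ((mixes.length : Int)) 1).foldl
        (fun r mix =>
          if mix == 0 then
            r ++ PySem.Int.toStr (PySem.List.pyGetD (PySem.List.pyGetD mixes mix []) ch 0)
          else
            r ++ "\t" ++ PySem.Int.toStr (PySem.List.pyGetD (PySem.List.pyGetD mixes mix []) ch 0))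
        result) ++ "\n")
    ""

-- ===== PORT B =====
-- one pass over the rows: `cols` holds one accumulator string per channel;
-- mixes[0] → pyGetD (Pre_ excludes empty mixes, where Python raises IndexError);
-- mixes[1:] → PySem.List.slice; the zip comprehension → zip + map; ''.join(c+'\n') → foldl append.
def make_string_from_mixes_alt (mixes : List (List Int)) : String :=
  let cols0 := (PySem.List.pyGetD mixes 0 []).map PySem.Int.toStr
  let cols := (PySem.List.slice mixes (some 1) none).foldl
      (fun cols row => (cols.zip row).map (fun p => p.1 ++ "\t" ++ PySem.Int.toStr p.2)) cols0
  cols.foldl (fun acc c => acc ++ (c ++ "\n")) ""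

-- ===== PRECONDITION & SPEC =====
-- Pre_: exactly the inputs where A returns: mixes nonempty and no row shorter than the first row
-- (A raises IndexError on empty mixes and when indexing a shorter row).
def Pre_make_string_from_mixes (mixes : List (List Int)) : Prop :=
  mixes ≠ [] ∧ ∀ row ∈ mixes, (mixes.headD []).length ≤ row.length
instance (mixes : List (List Int)) : Decidable (Pre_make_string_from_mixes mixes) := by
  unfold Pre_make_string_from_mixes; infer_instance

def pvWitness_make_string_from_mixes : List (List Int) := [[1, 2], [3, 4], [5, 6]]

def Spec_make_string_from_mixes (mixes : List (List Int)) (out : String) : Prop :=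
  out = make_string_from_mixes_alt mixes
instance (mixes : List (List Int)) (out : String) : Decidable (Spec_make_string_from_mixes mixes out) := by
  unfold Spec_make_string_from_mixes; infer_instance

-- ===== CLAIM (what is proved, stated in full; the proofs are below) =====
def Claim_equal_make_string_from_mixes : Prop := ∀ (mixes : List (List Int)), Dom_make_string_from_mixes mixes → Pre_make_string_from_mixes mixes → Spec_make_string_from_mixes mixes (make_string_from_mixes mixes)

-- ===== LEMMAS AND PROOFS =====

-- concatenation of f over a list (proof-only helper)
def pvCat {α : Type} (f : α → String) : List α → String
  | [] => ""
  | x :: l => f x ++ pvCat f l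

theorem pvCat_map {α β : Type} (g : α → β) (f : β → String) (l : List α) :
    pvCat f (l.map g) = pvCat (fun x => f (g x)) l := by
  induction l with
  | nil => rfl
  | cons x l ih => simp [pvCat, ih]

theorem foldl_str_cat {α : Type} (f : α → String) (l : List α) (acc : String) :
    l.foldl (fun r x => r ++ f x) acc = acc ++ pvCat f l := by
  induction l generalizing acc with
  | nil => simp [pvCat]
  | cons x l ih => simp [pvCat, ih, String.append_assoc]

theorem inner_eq (r0 : List Int) (rest : List (List Int)) (ch : Int) (result : String) :
    ((PySem.List.pyRange 0 (((r0 :: rest).length : Int)) 1).foldl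
      (fun r mix =>
        if mix == 0 then
          r ++ PySem.Int.toStr (PySem.List.pyGetD (PySem.List.pyGetD (r0 :: rest) mix []) ch 0)
        else
          r ++ "\t" ++ PySem.Int.toStr (PySem.List.pyGetD (PySem.List.pyGetD (r0 :: rest) mix []) ch 0))
      result)
    = result ++ (PySem.Int.toStr (PySem.List.pyGetD r0 ch 0) ++
        pvCat (fun row => "\t" ++ PySem.Int.toStr (PySem.List.pyGetD row ch 0)) rest) := by
  have h1 : (0 : Int) < ((r0 :: rest).length : Int) := by
    simp
  rw [PySem.List.pyRange_one_cons h1]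
  simp only [List.foldl_cons, zero_add]
  rw [if_pos (by decide : ((0:Int) == 0) = true)]
  have h0 : PySem.List.pyGetD (r0 :: rest) (0 : Int) [] = r0 := by
    simp
  rw [PySem.List.foldl_congr_mem' _ _
    (fun (r : String) (mix : Int) =>
      r ++ ("\t" ++ PySem.Int.toStr (PySem.List.pyGetD (PySem.List.pyGetD (r0 :: rest) mix []) ch 0))) _
    (by
      intro mix hmix r
      have : (1 : Int) ≤ mix := (PySem.List.mem_pyRange_one.mp hmix).1
      have hne : (mix == 0) = false := by simp; omega
      rw [hne]
      simp [String.append_assoc])]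
  rw [PySem.List.foldl_pyRange_pyGetD' (r0 :: rest) []
      (fun (acc : String) (row : List Int) =>
        acc ++ ("\t" ++ PySem.Int.toStr (PySem.List.pyGetD row ch 0)))
      _ (a := 1) (by norm_num)]
  simp only [Int.toNat_one, List.drop_succ_cons, List.drop_zero, h0]
  rw [foldl_str_cat]
  simp [String.append_assoc]

theorem A_eq (r0 : List Int) (rest : List (List Int)) :
    make_string_from_mixes (r0 :: rest)
    = pvCat (fun j : Nat =>
        (PySem.Int.toStr (r0.getD j 0) ++
          pvCat (fun row => "\t" ++ PySem.Int.toStr (row.getD j 0)) rest) ++ "\n")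
        (List.range r0.length) := by
  unfold make_string_from_mixes
  have h0 : PySem.List.pyGetD (r0 :: rest) (0 : Int) [] = r0 := by
    simp
  rw [h0]
  rw [PySem.List.foldl_congr_mem' _ _
    (fun (result : String) (ch : Int) =>
      result ++ ((PySem.Int.toStr (PySem.List.pyGetD r0 ch 0) ++
        pvCat (fun row => "\t" ++ PySem.Int.toStr (PySem.List.pyGetD row ch 0)) rest) ++ "\n")) _
    (by intro ch _ r; rw [inner_eq r0 rest ch r, String.append_assoc])]
  rw [foldl_str_cat]
  rw [PySem.List.pyRange_zero_nat, pvCat_map]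
  simp

-- one zipWith-style row step on column accumulators of the range-map shape
theorem step_eq (n : Nat) (g : Nat → String) (r : List Int) (hn : n ≤ r.length) :
    (((List.range n).map g).zip r).map (fun p => p.1 ++ "\t" ++ PySem.Int.toStr p.2)
    = (List.range n).map (fun j => g j ++ "\t" ++ PySem.Int.toStr (r.getD j 0)) := by
  apply List.ext_getElem
  · simp; omega
  · intro i h1 h2
    have hi : i < n := by simpa using h2
    have hir : i < r.length := lt_of_lt_of_le hi hn
    simp [List.getD_eq_getElem?_getD, List.getElem?_eq_getElem hir]

-- invariant of B's fold over the remaining rows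
theorem fold_eq (rs : List (List Int)) (n : Nat) (g : Nat → String)
    (hall : ∀ r ∈ rs, n ≤ r.length) :
    rs.foldl (fun cols row => (cols.zip row).map (fun p => p.1 ++ "\t" ++ PySem.Int.toStr p.2))
      ((List.range n).map g)
    = (List.range n).map
        (fun j => g j ++ pvCat (fun row => "\t" ++ PySem.Int.toStr (row.getD j 0)) rs) := by
  induction rs generalizing g with
  | nil => simp [pvCat]
  | cons r rs ih =>
    simp only [List.foldl_cons]
    rw [step_eq n g r (hall r (by simp))]
    rw [ih (fun j => g j ++ "\t" ++ PySem.Int.toStr (r.getD j 0))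
        (fun x hx => hall x (by simp [hx]))]
    apply List.map_congr_left
    intro j _
    simp [pvCat, String.append_assoc]

theorem make_string_from_mixes_spec : Claim_equal_make_string_from_mixes := by
  intro mixes _ hpre
  obtain ⟨hne, hall⟩ := hpre
  match mixes, hne with
  | r0 :: rest, _ =>
    unfold Spec_make_string_from_mixes
    rw [A_eq]
    unfold make_string_from_mixes_alt
    have h0 : PySem.List.pyGetD (r0 :: rest) (0 : Int) [] = r0 := by simp
    rw [h0, PySem.List.slice_from_one]
    simp only [List.tail_cons]
    have hcols0 : r0.map PySem.Int.toStr
        = (List.range r0.length).map (fun j => PySem.Int.toStr (r0.getD j 0)) := by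
      apply List.ext_getElem
      · simp
      · intro i h1 h2
        have : i < r0.length := by simpa using h1
        simp [List.getD_eq_getElem?_getD, List.getElem?_eq_getElem this]
    rw [hcols0,
      fold_eq rest r0.length (fun j => PySem.Int.toStr (r0.getD j 0))
        (by intro r hr; exact hall r (by simp [hr]))]
    rw [foldl_str_cat (fun c => c ++ "\n"), pvCat_map]
    simp
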